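-- pv_equiv track=rewrite | github.com/milkshakeiii/simple_python_projects | google_captives_full.py | tabular_totals
-- ===== SOURCE A (Python) =====
-- def tabular_totals(n):
--
--     #the tabular method.  store the results of total possible heights here as we
--     #find them.  start with a list of 1 representing undefined n = 0 and [0, 1]
--     #representing the permutations of n = 1 (no permutations with 0 visible rabbits,
--     #and 1 permutation with 1 visible rabbit)
--
--     totals_by_n = [[1], [0, 1]]
--
--     for tabled_n in range(2, n+1):
--         totals_by_n.append([0 for i in range(tabled_n+1)])
--
--         for start in range(1, tabled_n+1):
--             analagous_totals = totals_by_n[tabled_n-start]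
--
--             #for each possible fixed starting number, the total possible heights
--             #starting with that number is that total possible heights produced by an
--             #analagous lower n, times the number of extra permutations produced by
--             #irrelevent lower numbers. also the heights are increased by one
--             #by the fixed number
--
--             #get the analagous heights and add 1 (count for each height is
--             #stored at the index of the height) (ex. 2 heights and index 2
--             #means 2 ways to make 2 visible rabbits)
--             fixed_start_totals = [0 for i in range(tabled_n+1)]
--             for i in range(len(analagous_totals)):
--                 fixed_start_totals[i+1] = analagous_totals[i]
--
--             #account for extra permutations
--             multiplier = 1
--             for i in range(tabled_n-start+1, tabled_n):
--                 multiplier *= i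
--             fixed_start_totals = multiplied_list(fixed_start_totals, multiplier)
--
--             #add the permutations for this fixed start in with the others
--             for i in range(tabled_n+1):
--                 totals_by_n[tabled_n][i] += fixed_start_totals[i]
--
--     return totals_by_n[n]
--
-- def multiplied_list(original_list, multiplier):
--     return [item*multiplier for item in original_list]
-- ===== SOURCE B (Python) =====
-- def tabular_totals(n):
--     # Standard O(n^2) DP: row of unsigned Stirling numbers of the first kind,
--     # c(m, k) = c(m-1, k-1) + (m-1) * c(m-1, k).
--     row = [1]
--     for m in range(1, n + 1):
--         row = [prev + (m - 1) * cur
--                for prev, cur in zip([0] + row, row + [0])]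
--     return row
-- ===== Notes on version B (the rewrite author's own statement) =====
-- stated objective: faster
-- what changed: Replaced A's O(n^3)-operation tabulation (summing, for every row, over each fixed start a shifted copy of a lower row scaled by an iteratively computed falling-factorial multiplier) with the standard single-row O(n^2) DP recurrence c(m,k)=c(m-1,k-1)+(m-1)*c(m-1,k).
-- intended difference: For n = -1 A's negative-index wraparound accidentally returns [0, 1] (the n=1 row); B's loop simply does not run and returns [1], the natural base row for this unspecified negative input. — e.g. on tabular_totals(-1): A returns [0, 1], B returns [1]
import Mathlib
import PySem

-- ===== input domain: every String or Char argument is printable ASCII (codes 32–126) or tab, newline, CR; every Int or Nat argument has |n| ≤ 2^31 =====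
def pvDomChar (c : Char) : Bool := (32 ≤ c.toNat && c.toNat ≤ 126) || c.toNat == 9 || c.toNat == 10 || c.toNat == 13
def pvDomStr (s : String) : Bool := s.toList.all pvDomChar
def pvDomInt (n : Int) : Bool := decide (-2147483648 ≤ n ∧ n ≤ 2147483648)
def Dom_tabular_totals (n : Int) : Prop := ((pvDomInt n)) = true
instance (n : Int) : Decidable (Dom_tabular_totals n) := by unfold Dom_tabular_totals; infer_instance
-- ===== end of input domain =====

-- B replaces A's O(n^3)-operation tabulation by the standard O(n^2) one-row DP
-- recurrence c(m,k) = c(m-1,k-1) + (m-1)*c(m-1,k) (objective: faster).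

-- ===== PORT A =====
def multiplied_list (original_list : List Int) (multiplier : Int) : List Int :=
  original_list.map (fun item => item * multiplier)

-- body of A's outer loop for one tabled_n: build the new row by summing, for each
-- fixed start, the shifted lower row times the multiplier (the Python appends the
-- zero row first and mutates it in place; the start loop only reads rows below
-- tabled_n, so computing the row and appending it afterwards is step-for-step exact)
def pvRowA (tbl : List (List Int)) (tn : Int) : List Int :=
  (PySem.List.pyRange 1 (tn + 1) 1).foldl (fun tot start =>
    let analagous_totals := PySem.List.pyGetD tbl (tn - start) []
    let fixed_start_totals :=
      (PySem.List.pyRange 0 (PySem.List.len analagous_totals) 1).foldl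
        (fun fx i => PySem.List.pySetD fx (i + 1) (PySem.List.pyGetD analagous_totals i 0))
        ((PySem.List.pyRange 0 (tn + 1) 1).map (fun _ => (0 : Int)))
    let multiplier :=
      (PySem.List.pyRange (tn - start + 1) tn 1).foldl (fun m i => m * i) 1
    let fixed_start_totals := multiplied_list fixed_start_totals multiplier
    (PySem.List.pyRange 0 (tn + 1) 1).foldl
      (fun t i => PySem.List.pySetD t i (PySem.List.pyGetD t i 0 + PySem.List.pyGetD fixed_start_totals i 0))
      tot)
    ((PySem.List.pyRange 0 (tn + 1) 1).map (fun _ => (0 : Int)))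

def tabular_totals (n : Int) : List Int :=
  let totals_by_n :=
    (PySem.List.pyRange 2 (n + 1) 1).foldl
      (fun tbl tabled_n => tbl ++ [pvRowA tbl tabled_n]) [[1], [0, 1]]
  (PySem.List.pyGet? totals_by_n n).getD []   -- Pre_ excludes the IndexError (n ≤ -3)

-- ===== PORT B =====
def tabular_totals_alt (n : Int) : List Int :=
  (PySem.List.pyRange 1 (n + 1) 1).foldl (fun row m =>
    List.zipWith (fun prev cur => prev + (m - 1) * cur) (0 :: row) (row ++ [0]))
    [1]

-- ===== PRECONDITION & SPEC =====
-- Pre_ excludes only n ≤ -3, where A raises IndexError (totals_by_n[n] out of range).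
def Pre_tabular_totals (n : Int) : Prop := -2 ≤ n
instance (n : Int) : Decidable (Pre_tabular_totals n) := by unfold Pre_tabular_totals; infer_instance
def pvWitness_tabular_totals : Int := 4

-- For n = -1 A's negative-index wraparound accidentally returns [0, 1] (the n = 1 row);
-- B's loop simply does not run and returns [1], the natural base row for this
-- unspecified negative input.
def D_tabular_totals (n : Int) : Prop := n = -1
instance (n : Int) : Decidable (D_tabular_totals n) := by unfold D_tabular_totals; infer_instance

def Spec_tabular_totals (n : Int) (out : List Int) : Prop :=
  ¬ D_tabular_totals n → out = tabular_totals_alt n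
instance (n : Int) (out : List Int) : Decidable (Spec_tabular_totals n out) := by
  unfold Spec_tabular_totals; infer_instance

def pvDiffWitness_tabular_totals : Int := -1
def pvDiffWitnessOut_tabular_totals : (List Int) × (List Int) := ([0, 1], [1])

-- ===== CLAIM (what is proved, stated in full; the proofs are below) =====
def Claim_unchanged_tabular_totals : Prop :=
  ∀ (n : Int), Dom_tabular_totals n → Pre_tabular_totals n → Spec_tabular_totals n (tabular_totals n)
def Claim_changed_tabular_totals : Prop :=
  Dom_tabular_totals (pvDiffWitness_tabular_totals) ∧ Pre_tabular_totals (pvDiffWitness_tabular_totals) ∧ D_tabular_totals (pvDiffWitness_tabular_totals) ∧ tabular_totals (pvDiffWitness_tabular_totals) = pvDiffWitnessOut_tabular_totals.1 ∧ tabular_totals_alt (pvDiffWitness_tabular_totals) = pvDiffWitnessOut_tabular_totals.2 ∧ pvDiffWitnessOut_tabular_totals.1 ≠ pvDiffWitnessOut_tabular_totals.2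
def Claim_exact_tabular_totals : Prop :=
  ∀ (n : Int), Dom_tabular_totals n → Pre_tabular_totals n → D_tabular_totals n → tabular_totals n ≠ tabular_totals_alt n

-- ===== LEMMAS AND PROOFS =====

-- B's row sequence: rowB m is the row after m iterations of B's loop.
def rowB : Nat → List Int
  | 0 => [1]
  | m + 1 =>
      List.zipWith (fun prev cur => prev + (m : Int) * cur) (0 :: rowB m) (rowB m ++ [0])

theorem length_rowB (m : Nat) : (rowB m).length = m + 1 := by
  induction m with
  | zero => rfl
  | succ m ih => simp [rowB, ih]

-- getD through the zipWith step (lengths equal)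
theorem getD_zip_step (q : Int) (a b : List Int) (h : a.length = b.length) (i : Nat) :
    (List.zipWith (fun p c => p + q * c) a b).getD i 0 = a.getD i 0 + q * b.getD i 0 := by
  induction a generalizing b i with
  | nil => cases b with
    | nil => simp
    | cons y ys => simp at h
  | cons x xs ih =>
    cases b with
    | nil => simp at h
    | cons y ys =>
      cases i with
      | zero => simp
      | succ k => simpa using ih ys (by simpa using h) k

theorem getD_append_zero (l : List Int) (i : Nat) : (l ++ [(0 : Int)]).getD i 0 = l.getD i 0 := by
  induction l generalizing i with
  | nil => cases i <;> simp
  | cons x xs ih => cases i with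
    | zero => simp
    | succ k => simpa using ih k

theorem getD_append_replicate_zero (l : List Int) (k i : Nat) :
    (l ++ List.replicate k (0 : Int)).getD i 0 = l.getD i 0 := by
  induction l generalizing i with
  | nil => simp [List.getD]
  | cons x xs ih => cases i with
    | zero => simp
    | succ k => simpa using ih k

-- pointwise recurrence of rowB
theorem rowB_getD (m i : Nat) :
    (rowB (m + 1)).getD i 0 =
      (if i = 0 then 0 else (rowB m).getD (i - 1) 0) + (m : Int) * (rowB m).getD i 0 := by
  have h := getD_zip_step (m : Int) (0 :: rowB m) (rowB m ++ [0])
    (by simp [length_rowB]) i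
  rw [rowB, h, getD_append_zero]
  cases i with
  | zero => simp
  | succ k => simp

theorem getD_map_mul (l : List Int) (q : Int) (i : Nat) :
    (l.map (fun item => item * q)).getD i 0 = l.getD i 0 * q := by
  induction l generalizing i with
  | nil => simp
  | cons x xs ih => cases i with
    | zero => simp
    | succ k => simpa using ih k

-- A's multiplier loop, in Nat indices
def multN (T s : Nat) : Int :=
  (PySem.List.pyRange ((T : Int) - s + 1) T 1).foldl (fun m i => m * i) 1

theorem multN_one (T : Nat) : multN T 1 = 1 := by
  unfold multN
  rw [show (T : Int) - ((1 : Nat) : Int) + 1 = (T : Int) by push_cast; ring,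
    PySem.List.pyRange_one_eq_nil le_rfl]
  rfl

theorem multN_succ (T s : Nat) (h1 : 1 ≤ s) (h2 : s ≤ T) :
    multN (T + 1) (s + 1) = multN T s * T := by
  unfold multN
  rw [show ((T + 1 : Nat) : Int) - ((s + 1 : Nat) : Int) + 1 = (T : Int) - s + 1 by push_cast; ring]
  rw [show ((T + 1 : Nat) : Int) = (T : Int) + 1 by push_cast; ring]
  rw [PySem.List.pyRange_one_succ_right (by omega : (T : Int) - s + 1 ≤ (T : Int)),
    List.foldl_append]
  rfl

-- A's shifted-copy term and its sum over all starts
def termN (T s i : Nat) : Int :=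
  (if i = 0 then 0 else (rowB (T - s)).getD (i - 1) 0) * multN T s

def sumN (T i : Nat) : Int :=
  ((List.range T).map (fun k => termN T (k + 1) i)).sum

theorem getD_eq_zero_of_le {l : List Int} {i : Nat} (h : l.length ≤ i) : l.getD i 0 = 0 := by
  simp [List.getD_eq_getElem?_getD, List.getElem?_eq_none h]

theorem sumN_one (i : Nat) : sumN 1 i = (rowB 1).getD i 0 := by
  have hrow : rowB 1 = [0, 1] := by decide
  simp only [sumN, List.range_one, List.map_cons, List.map_nil, List.sum_cons, List.sum_nil,
    termN, hrow]
  rw [multN_one]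
  match i with
  | 0 => simp
  | 1 => simp [rowB]
  | (k + 2) =>
    rw [getD_eq_zero_of_le (l := [(0 : Int), 1]) (by simp),
      getD_eq_zero_of_le (l := rowB 0) (by simp [length_rowB])]
    simp

theorem sumN_succ_eq (T i : Nat) (hT : 1 ≤ T) (ih : sumN T i = (rowB T).getD i 0) :
    sumN (T + 1) i = (rowB (T + 1)).getD i 0 := by
  have hsplit : sumN (T + 1) i =
      termN (T + 1) 1 i + ((List.range T).map (fun k => termN (T + 1) (k + 2) i)).sum := by
    rw [sumN, List.range_succ_eq_map]
    simp [sumN, Function.comp_def]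
  have hterm : ∀ k ∈ List.range T, termN (T + 1) (k + 2) i = (T : Int) * termN T (k + 1) i := by
    intro k hk
    have hk' : k < T := List.mem_range.mp hk
    unfold termN
    rw [multN_succ T (k + 1) (by omega) (by omega),
      show T + 1 - (k + 2) = T - (k + 1) by omega]
    ring
  rw [hsplit, List.map_congr_left hterm]
  have hpull : ((List.range T).map (fun k => (T : Int) * termN T (k + 1) i)).sum
      = (T : Int) * sumN T i := by
    simp [sumN, List.sum_map_mul_left]
  rw [hpull, ih, rowB_getD]
  unfold termN
  rw [multN_one, show T + 1 - 1 = T by omega]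
  ring

theorem sumN_eq (T : Nat) (hT : 1 ≤ T) (i : Nat) : sumN T i = (rowB T).getD i 0 := by
  induction T with
  | zero => omega
  | succ T ih =>
    rcases Nat.eq_or_lt_of_le hT with h | h
    · rw [← h]; exact sumN_one i
    · exact sumN_succ_eq T i (by omega) (ih (by omega) )

-- the zero row [0 for i in range(tn+1)]
theorem zeroRow_eq (N : Nat) :
    ((PySem.List.pyRange 0 (N : Int) 1).map (fun _ => (0 : Int))) = List.replicate N 0 := by
  rw [List.map_const', PySem.List.length_pyRange_one]
  simp

-- A's shift loop: writing analog into positions 1..len of a longer zero row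
theorem fixedLemma (analog base : List Int) (h : analog.length < base.length) :
    (PySem.List.pyRange 0 (PySem.List.len analog) 1).foldl
      (fun fx i => PySem.List.pySetD fx (i + 1) (PySem.List.pyGetD analog i 0)) base
    = base.take 1 ++ analog ++ base.drop (analog.length + 1) := by
  induction analog using List.reverseRecOn with
  | nil =>
    rw [show PySem.List.len ([] : List Int) = ((0:Nat) : Int) by simp,
      PySem.List.pyRange_one_eq_nil (by simp)]
    cases base with
    | nil => simp at h
    | cons b bs => simp
  | append_singleton xs x ih =>
    have hxb : xs.length + 1 < base.length := by simpa using h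
    have hlen : PySem.List.len (xs ++ [x]) = ((xs.length : Int)) + 1 := by simp
    rw [hlen, PySem.List.pyRange_one_succ_right (by positivity), List.foldl_append]
    have hinner :
        (PySem.List.pyRange 0 ((xs.length : Int)) 1).foldl
          (fun fx i => PySem.List.pySetD fx (i + 1) (PySem.List.pyGetD (xs ++ [x]) i 0)) base
        = (PySem.List.pyRange 0 ((xs.length : Int)) 1).foldl
          (fun fx i => PySem.List.pySetD fx (i + 1) (PySem.List.pyGetD xs i 0)) base := by
      apply PySem.List.foldl_congr_mem
      intro acc i hi
      have hi' := (PySem.List.mem_pyRange_one).mp hi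
      obtain ⟨k, rfl⟩ : ∃ k : Nat, i = (k : Int) := ⟨i.toNat, by omega⟩
      have hk : k < xs.length := by exact_mod_cast hi'.2
      rw [PySem.List.pyGetD_natCast, PySem.List.pyGetD_natCast,
        List.getD_eq_getElem?_getD, List.getD_eq_getElem?_getD,
        List.getElem?_append_left hk]
    simp only [PySem.List.len_eq] at ih
    rw [hinner, ih (by omega)]
    simp only [List.foldl_cons, List.foldl_nil]
    have hget : PySem.List.pyGetD (xs ++ [x]) ((xs.length : Int)) 0 = x := by
      rw [PySem.List.pyGetD_natCast, List.getD_eq_getElem?_getD,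
        List.getElem?_append_right (le_refl _)]
      simp
    have hcast : ((xs.length : Int)) + 1 = (((xs.length + 1 : Nat)) : Int) := by push_cast; ring
    rw [hget, hcast, PySem.List.pySetD_natCast]
    have hlen2 : (base.take 1 ++ xs).length = xs.length + 1 := by
      simp [List.length_take, Nat.min_eq_left (by omega : 1 ≤ base.length)]
      omega
    rw [show base.take 1 ++ xs ++ base.drop (xs.length + 1)
        = (base.take 1 ++ xs) ++ base.drop (xs.length + 1) by simp [List.append_assoc]]
    rw [List.set_append_right _ _ (by omega), hlen2, Nat.sub_self]
    rw [List.drop_eq_getElem_cons hxb, List.set_cons_zero]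
    simp [List.append_assoc]

-- A's accumulation loop: tot[i] += fx[i] for i in range(M), pointwise
theorem addLemma (M : Nat) (t fx : List Int) (h : M ≤ t.length) :
    (PySem.List.pyRange 0 (M : Int) 1).foldl
      (fun tt i => PySem.List.pySetD tt i (PySem.List.pyGetD tt i 0 + PySem.List.pyGetD fx i 0)) t
    = (List.range M).map (fun i => t.getD i 0 + fx.getD i 0) ++ t.drop M := by
  induction M with
  | zero =>
    rw [PySem.List.pyRange_one_eq_nil (by simp)]
    simp
  | succ M ih =>
    rw [show ((M + 1 : Nat) : Int) = (M : Int) + 1 by push_cast; ring,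
      PySem.List.pyRange_one_succ_right (by positivity), List.foldl_append, ih (by omega)]
    have hM : M < t.length := by omega
    have hdrop : t.drop M = t[M] :: t.drop (M + 1) := List.drop_eq_getElem_cons hM
    have hget : PySem.List.pyGetD (List.map (fun i => t.getD i 0 + fx.getD i 0) (List.range M) ++ t.drop M) ((M : Nat) : Int) 0 = t[M] := by
      rw [PySem.List.pyGetD_natCast, hdrop]
      rw [List.getD_eq_getElem?_getD, List.getElem?_append_right (by simp)]
      simp [List.getElem?_eq_getElem hM]
    simp only [List.foldl_cons, List.foldl_nil, hget, PySem.List.pySetD_natCast]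
    rw [hdrop, List.set_append_right _ _ (by simp), List.range_succ]
    simp only [List.map_append, List.map_cons, List.map_nil, List.append_assoc, List.length_map,
      List.length_range, Nat.sub_self, List.set_cons_zero]
    simp [List.getD_eq_getElem?_getD, List.getElem?_eq_getElem hM]

theorem getD_shift (l : List Int) (k i : Nat) :
    (List.replicate 1 (0 : Int) ++ l ++ List.replicate k 0).getD i 0
    = if i = 0 then 0 else l.getD (i - 1) 0 := by
  cases i with
  | zero => simp
  | succ j =>
    simp only [List.replicate_one, List.cons_append, List.nil_append, List.getD_cons_succ,
      Nat.succ_ne_zero, if_false, Nat.succ_sub_one, List.append_assoc]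
    simpa using getD_append_replicate_zero l k j

-- one start of A's loop, acting on a row in mapped form
theorem stepLemma (T : Nat) (hT : 1 ≤ T) (s : Int) (hs1 : 1 ≤ s) (hs2 : s ≤ (T : Int))
    (g : Nat → Int) :
    (fun tot start =>
      let analagous_totals := PySem.List.pyGetD ((List.range T).map rowB) ((T : Int) - start) []
      let fixed_start_totals :=
        (PySem.List.pyRange 0 (PySem.List.len analagous_totals) 1).foldl
          (fun fx i => PySem.List.pySetD fx (i + 1) (PySem.List.pyGetD analagous_totals i 0))
          ((PySem.List.pyRange 0 ((T : Int) + 1) 1).map (fun _ => (0 : Int)))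
      let multiplier :=
        (PySem.List.pyRange ((T : Int) - start + 1) (T : Int) 1).foldl (fun m i => m * i) 1
      let fixed_start_totals := multiplied_list fixed_start_totals multiplier
      (PySem.List.pyRange 0 ((T : Int) + 1) 1).foldl
        (fun t i => PySem.List.pySetD t i (PySem.List.pyGetD t i 0 + PySem.List.pyGetD fixed_start_totals i 0))
        tot)
      ((List.range (T + 1)).map g) s
    = (List.range (T + 1)).map (fun i => g i + termN T s.toNat i) := by
  dsimp only
  have hsub : (T : Int) - s = ((T - s.toNat : Nat) : Int) := by omega
  have hlt : T - s.toNat < T := by omega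
  have hanalog : PySem.List.pyGetD ((List.range T).map rowB) ((T : Int) - s) [] = rowB (T - s.toNat) := by
    rw [hsub, PySem.List.pyGetD_natCast, PySem.List.getD_map_range rowB T _ [] hlt]
  rw [hanalog]
  rw [show (T : Int) + 1 = ((T + 1 : Nat) : Int) by push_cast; ring, zeroRow_eq (T + 1)]
  rw [fixedLemma (rowB (T - s.toNat)) (List.replicate (T + 1) 0)
    (by simp [length_rowB]; omega)]
  rw [List.take_replicate, List.drop_replicate]
  rw [show (T : Int) - s + 1 = (T : Int) - ((s.toNat : Nat) : Int) + 1 by omega]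
  rw [show ((PySem.List.pyRange ((T : Int) - ((s.toNat : Nat) : Int) + 1) (T : Int) 1).foldl
      (fun m i => m * i) 1) = multN T s.toNat from rfl]
  rw [addLemma (T + 1) ((List.range (T + 1)).map g) _ (by simp)]
  rw [List.drop_eq_nil_of_le (by simp), List.append_nil]
  apply List.map_congr_left
  intro i hi
  have hiN : i < T + 1 := List.mem_range.mp hi
  rw [PySem.List.getD_map_range g (T + 1) i 0 hiN]
  unfold multiplied_list
  rw [getD_map_mul]
  have hmin : min 1 (T + 1) = 1 := by omega
  rw [hmin, getD_shift]
  rfl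

-- full start loop of A for one tabled_n
theorem startsFold (T : Nat) (hT : 1 ≤ T) (l : List Int)
    (hl : ∀ s ∈ l, 1 ≤ s ∧ s ≤ (T : Int)) (g : Nat → Int) :
    l.foldl (fun tot start =>
      let analagous_totals := PySem.List.pyGetD ((List.range T).map rowB) ((T : Int) - start) []
      let fixed_start_totals :=
        (PySem.List.pyRange 0 (PySem.List.len analagous_totals) 1).foldl
          (fun fx i => PySem.List.pySetD fx (i + 1) (PySem.List.pyGetD analagous_totals i 0))
          ((PySem.List.pyRange 0 ((T : Int) + 1) 1).map (fun _ => (0 : Int)))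
      let multiplier :=
        (PySem.List.pyRange ((T : Int) - start + 1) (T : Int) 1).foldl (fun m i => m * i) 1
      let fixed_start_totals := multiplied_list fixed_start_totals multiplier
      (PySem.List.pyRange 0 ((T : Int) + 1) 1).foldl
        (fun t i => PySem.List.pySetD t i (PySem.List.pyGetD t i 0 + PySem.List.pyGetD fixed_start_totals i 0))
        tot)
      ((List.range (T + 1)).map g)
    = (List.range (T + 1)).map (fun i => g i + (l.map (fun s => termN T s.toNat i)).sum) := by
  induction l generalizing g with
  | nil => simp
  | cons s l ih =>
    have hstep := stepLemma T hT s (hl s (List.mem_cons_self)).1 (hl s (List.mem_cons_self)).2 g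
    have hih := ih (fun x hx => hl x (List.mem_cons_of_mem _ hx)) (fun i => g i + termN T s.toNat i)
    rw [List.foldl_cons]
    dsimp only at hstep hih ⊢
    rw [hstep, hih]
    apply List.map_congr_left
    intro i _
    simp [add_assoc]

theorem map_getD_self (l : List Int) :
    (List.range l.length).map (fun i => l.getD i 0) = l := by
  apply List.ext_getElem (by simp)
  intro i h1 h2
  simp [List.getD_eq_getElem?_getD, List.getElem?_eq_getElem h2]

theorem rowA_eq (T : Nat) (hT : 1 ≤ T) :
    pvRowA ((List.range T).map rowB) (T : Int) = rowB T := by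
  unfold pvRowA
  have hzero : ((PySem.List.pyRange 0 ((T : Int) + 1) 1).map (fun _ => (0 : Int)))
      = (List.range (T + 1)).map (fun _ => (0 : Int)) := by
    rw [show (T : Int) + 1 = ((T + 1 : Nat) : Int) by push_cast; ring, zeroRow_eq (T + 1)]
    simp [List.map_const']
  have h := startsFold T hT (PySem.List.pyRange 1 ((T : Int) + 1) 1)
    (fun s hs => by
      have := (PySem.List.mem_pyRange_one).mp hs
      exact ⟨this.1, by omega⟩) (fun _ => (0 : Int))
  rw [← hzero] at h
  rw [h]
  have hmaps : ∀ i : Nat,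
      (PySem.List.pyRange 1 ((T : Int) + 1) 1).map (fun s => termN T s.toNat i)
      = (List.range T).map (fun k => termN T (k + 1) i) := by
    intro i
    rw [PySem.List.pyRange_one, List.map_map, show ((T : Int) + 1 - 1).toNat = T by omega]
    apply List.map_congr_left
    intro k _
    simp only [Function.comp]
    congr 1
    omega
  calc (List.range (T + 1)).map (fun i => 0 + ((PySem.List.pyRange 1 ((T : Int) + 1) 1).map (fun s => termN T s.toNat i)).sum)
      = (List.range (T + 1)).map (fun i => (rowB T).getD i 0) := by
        apply List.map_congr_left
        intro i _
        rw [hmaps i]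
        rw [show ((List.range T).map (fun k => termN T (k + 1) i)).sum = sumN T i from rfl]
        rw [sumN_eq T hT i, zero_add]
    _ = rowB T := by rw [← length_rowB T, map_getD_self]

theorem tblA_eq (T : Nat) (hT : 1 ≤ T) :
    (PySem.List.pyRange 2 ((T : Int) + 1) 1).foldl
      (fun tbl tabled_n => tbl ++ [pvRowA tbl tabled_n]) [[1], [0, 1]]
    = (List.range (T + 1)).map rowB := by
  induction T with
  | zero => omega
  | succ T ih =>
    rcases Nat.eq_or_lt_of_le hT with h | h
    · rw [← h]
      rw [PySem.List.pyRange_one_eq_nil (by norm_num)]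
      have h1 : rowB 1 = [0, 1] := by decide
      simp [List.range_succ, rowB, h1]
    · have hT1 : 1 ≤ T := by omega
      rw [show ((T + 1 : Nat) : Int) + 1 = (((T : Int) + 1)) + 1 by push_cast; ring,
        PySem.List.pyRange_one_succ_right (by omega : (2 : Int) ≤ (T : Int) + 1),
        List.foldl_append, ih hT1]
      simp only [List.foldl_cons, List.foldl_nil]
      rw [show (T : Int) + 1 = ((T + 1 : Nat) : Int) by push_cast; ring,
        rowA_eq (T + 1) (by omega)]
      rw [List.range_succ (n := T + 1), List.map_append]
      rfl

theorem altB_eq (T : Nat) : tabular_totals_alt (T : Int) = rowB T := by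
  induction T with
  | zero => simp [tabular_totals_alt, PySem.List.pyRange_one_eq_nil, rowB]
  | succ T ih =>
    unfold tabular_totals_alt at *
    rw [show ((T + 1 : Nat) : Int) + 1 = ((T : Int) + 1) + 1 by push_cast; ring,
      PySem.List.pyRange_one_succ_right (by omega : (1 : Int) ≤ (T : Int) + 1),
      List.foldl_append]
    rw [ih]
    show List.zipWith _ (0 :: rowB T) (rowB T ++ [0]) = rowB (T + 1)
    rw [rowB]
    congr 1
    funext p c
    push_cast
    ring

theorem A_eq_B_nonneg (T : Nat) : tabular_totals (T : Int) = tabular_totals_alt (T : Int) := by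
  rw [altB_eq]
  cases T with
  | zero => decide
  | succ T =>
    unfold tabular_totals
    dsimp only
    rw [show ((T + 1 : Nat) : Int) + 1 = ((T : Int) + 1) + 1 by push_cast; ring]
    rw [show ((T : Int) + 1) + 1 = (((T + 1 : Nat) : Int)) + 1 by push_cast; ring,
      tblA_eq (T + 1) (by omega)]
    rw [PySem.List.pyGet?_natCast]
    simp [List.getElem?_map, List.getElem?_range (by omega : T + 1 < T + 1 + 1)]

-- ===== VERDICT (by name: the statement is the Claim_ definition above) =====
theorem tabular_totals_spec : Claim_unchanged_tabular_totals := by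
  intro n hdom hpre hnd
  have hp : -2 ≤ n := hpre
  rcases (by omega : n = -2 ∨ n = -1 ∨ 0 ≤ n) with h | h | h
  · subst h; decide
  · exact absurd h hnd
  · obtain ⟨T, rfl⟩ : ∃ T : Nat, n = (T : Int) := ⟨n.toNat, by omega⟩
    exact A_eq_B_nonneg T

theorem tabular_totals_changed : Claim_changed_tabular_totals := by
  unfold Claim_changed_tabular_totals; decide

theorem tabular_totals_tight : Claim_exact_tabular_totals := by
  intro n _ _ hd
  unfold D_tabular_totals at hd
  subst hd
  decide
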